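-- pv_equiv track=rewrite | github.com/subeenc/QNQCDE | case4_qa/data/generate_qa.py | add_qa_turn
-- ===== SOURCE A (Python) =====
-- def add_qa_turn(dialogues):
--     all_qa_turn = []
--     for dial in dialogues:
--         turns = dial.split("#")
--         qa_turn = []
--         for i, turn in enumerate(turns):
--             if i == 0:
--                 if '?' in turn:
--                     qa_turn.append('1')
--                 else:
--                     qa_turn.append('3')
--             elif i == len(turns) - 1:
--                 if '?' in turns[i - 1]:
--                     qa_turn.append('0')
--                 else:
--                     qa_turn.append('3')
--             else:
--                 if '?' in turns[i - 1] and '?' not in turn: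
--                     qa_turn.append('0')
--                 elif '?' not in turns[i - 1] and '?' in turn:
--                     qa_turn.append('1')
--                 elif '?' in turns[i - 1] and '?' in turn:
--                     qa_turn.append('2')
--                 else:
--                     qa_turn.append('3')
--         qa_turn = ''.join(qa_turn)
--         all_qa_turn.append(qa_turn)
--     return "|".join(all_qa_turn)
-- ===== SOURCE B (Python) =====
-- def add_qa_turn(dialogues):
--     # Streaming state machine over the raw characters: no split, no indexing.
--     # A turn closed at '#' is never the last turn; the turn closed at end-of-string is.
--     out = []
--     for dial in dialogues:
--         digits = []
--         first = True
--         prevq = False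
--         curq = False
--         for ch in dial:
--             if ch == '#':
--                 if first:
--                     digits.append('1' if curq else '3')
--                 else:
--                     digits.append('2' if prevq and curq else
--                                   '0' if prevq else
--                                   '1' if curq else '3')
--                 first = False
--                 prevq, curq = curq, False
--             elif ch == '?':
--                 curq = True
--         if first:
--             digits.append('1' if curq else '3')
--         else:
--             digits.append('0' if prevq else '3')
--         out.append(''.join(digits))
--     return '|'.join(out)
-- ===== Notes on version B (the rewrite author's own statement) =====
-- stated objective: alternative
-- what changed: A splits each dialogue on '#' and classifies each turn by indexed first/last/middle branching over the turns list; B never splits: it streams over the raw characters with a (first, prev-had-?, cur-has-?) state machine, emitting a digit at each '#' and one final digit at end of string.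
import Mathlib
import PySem

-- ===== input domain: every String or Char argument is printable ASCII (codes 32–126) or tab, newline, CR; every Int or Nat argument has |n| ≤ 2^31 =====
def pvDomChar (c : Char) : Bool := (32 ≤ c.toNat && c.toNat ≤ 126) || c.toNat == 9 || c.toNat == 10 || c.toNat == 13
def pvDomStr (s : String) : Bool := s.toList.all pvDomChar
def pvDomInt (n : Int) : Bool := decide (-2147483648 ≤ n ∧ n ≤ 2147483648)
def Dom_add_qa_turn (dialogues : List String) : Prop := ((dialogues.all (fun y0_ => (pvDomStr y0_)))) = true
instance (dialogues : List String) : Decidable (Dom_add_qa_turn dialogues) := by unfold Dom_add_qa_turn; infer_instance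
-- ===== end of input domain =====

-- B replaces A's split-then-index-and-branch pass by a single streaming state machine
-- over the raw characters (no split, no flag list, no index arithmetic) — alternative algorithm.

-- ===== PORT A =====
-- literal transliteration of A: per dialogue, split on '#', enumerate the turns and append one
-- digit per turn through the first/last/middle branch cascade, then join.
def add_qa_turn (dialogues : List String) : String :=
  let all_qa_turn := dialogues.foldl (fun all_qa_turn dial =>
    let turns := (PySem.Str.split? dial "#").getD []   -- sep "#" ≠ "": split? is always some
    let qa_turn := (PySem.List.enumerate turns).foldl (fun qa_turn p =>
      let i := p.1
      let turn := p.2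
      qa_turn ++
        [ if i = 0 then
            (if PySem.Str.isIn "?" turn then "1" else "3")
          else if i = (turns.length : Int) - 1 then
            (if PySem.Str.isIn "?" (PySem.List.pyGetD turns (i - 1) "") then "0" else "3")
          else
            if PySem.Str.isIn "?" (PySem.List.pyGetD turns (i - 1) "") = true ∧
               ¬ PySem.Str.isIn "?" turn = true then "0"
            else if ¬ PySem.Str.isIn "?" (PySem.List.pyGetD turns (i - 1) "") = true ∧
               PySem.Str.isIn "?" turn = true then "1"
            else if PySem.Str.isIn "?" (PySem.List.pyGetD turns (i - 1) "") = true ∧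
               PySem.Str.isIn "?" turn = true then "2"
            else "3" ]) []
    all_qa_turn ++ [PySem.Str.join "" qa_turn]) []
  PySem.Str.join "|" all_qa_turn

-- ===== PORT B =====
-- Source B's character step: state = (digits, first, prevq, curq); emit a digit at each '#'.
def stepQA (st : List String × Bool × Bool × Bool) (ch : Char) :
    List String × Bool × Bool × Bool :=
  match st with
  | (ds, first, prevq, curq) =>
    if ch = '#' then
      (ds ++ [ if first then (if curq then "1" else "3")
               else if prevq && curq then "2"
               else if prevq then "0"
               else if curq then "1" else "3" ],
       false, curq, false)
    else if ch = '?' then (ds, first, prevq, true)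
    else (ds, first, prevq, curq)

-- Source B's end-of-string emit for the final turn.
def finishQA (st : List String × Bool × Bool × Bool) : List String :=
  match st with
  | (ds, first, prevq, curq) =>
    ds ++ [ if first then (if curq then "1" else "3")
            else (if prevq then "0" else "3") ]

def add_qa_turn_alt (dialogues : List String) : String :=
  let out := dialogues.foldl (fun out dial =>
    let digits := finishQA (dial.toList.foldl stepQA ([], true, false, false))
    out ++ [PySem.Str.join "" digits]) []
  PySem.Str.join "|" out

-- ===== PRECONDITION & SPEC =====
def Spec_add_qa_turn (dialogues : List String) (out : String) : Prop := out = add_qa_turn_alt dialogues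
instance (dialogues : List String) (out : String) : Decidable (Spec_add_qa_turn dialogues out) := by unfold Spec_add_qa_turn; infer_instance

-- ===== CLAIM (what is proved, stated in full; the proofs are below) =====
def Claim_equal_add_qa_turn : Prop := ∀ (dialogues : List String), Dom_add_qa_turn dialogues → Spec_add_qa_turn dialogues (add_qa_turn dialogues)

-- ===== LEMMAS AND PROOFS =====

-- reference splitter on '#' (structural recursion; proof-side only)
def splitH : List Char → List (List Char)
  | [] => [[]]
  | c :: rest =>
    if c = '#' then [] :: splitH rest
    else
      match splitH rest with
      | [] => [[c]]
      | s :: ss => (c :: s) :: ss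

lemma splitH_ne_nil (l : List Char) : splitH l ≠ [] := by
  cases l with
  | nil => simp [splitH]
  | cons c rest =>
    simp only [splitH]
    split_ifs
    · simp
    · cases h : splitH rest <;> simp

-- the PySem splitOn fuel loop computes splitH (single-char separator '#')
lemma go_spec (fuel : Nat) :
    ∀ (l cur : List Char) (accs : List (List Char)), l.length < fuel →
      PySem.Chars.splitOn.go ['#'] fuel l cur accs
        = accs.reverse ++ ((cur.reverse ++ (splitH l).head!) :: (splitH l).tail) := by
  induction fuel with
  | zero => intro l cur accs h; omega
  | succ f ih =>
    intro l cur accs h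
    cases l with
    | nil =>
      simp [PySem.Chars.splitOn.go, splitH]
    | cons c rest =>
      by_cases hc : c = '#'
      · subst hc
        have hpre : List.isPrefixOf ['#'] ('#' :: rest) = true := by
          simp [List.isPrefixOf]
        simp only [PySem.Chars.splitOn.go, hpre, if_pos]
        rw [show List.drop (['#'].length) ('#' :: rest) = rest from rfl]
        rw [ih rest [] ((List.reverse cur) :: accs) (by simpa using Nat.lt_of_succ_lt_succ h)]
        have := splitH_ne_nil rest
        cases hs : splitH rest with
        | nil => exact absurd hs this
        | cons s ss => simp [splitH, hs]
      · have hpre : List.isPrefixOf ['#'] (c :: rest) = false := by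
          simp [List.isPrefixOf]
          intro hcc; exact hc hcc.symm
        simp only [PySem.Chars.splitOn.go, hpre]
        rw [if_neg (by simp)]
        rw [ih rest (c :: cur) accs (by simpa using Nat.lt_of_succ_lt_succ h)]
        have := splitH_ne_nil rest
        cases hs : splitH rest with
        | nil => exact absurd hs this
        | cons s ss => simp [splitH, hc, hs]

lemma splitOn_eq_splitH (l : List Char) : PySem.Chars.splitOn l ['#'] = splitH l := by
  unfold PySem.Chars.splitOn
  rw [go_spec (l.length + 1) l [] [] (by omega)]
  have := splitH_ne_nil l
  cases hs : splitH l with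
  | nil => exact absurd hs this
  | cons s ss => simp

-- the three digit rules as functions of the '?' flags
def fdD (c : Bool) : String := if c then "1" else "3"
def lastD (p : Bool) : String := if p then "0" else "3"
def midD (p c : Bool) : String :=
  if p && c then "2" else if p then "0" else if c then "1" else "3"

def hasQ (s : List Char) : Bool := s.contains '?'

lemma hasQ_cons (x : Char) (s : List Char) :
    hasQ (x :: s) = ((x == '?') || hasQ s) := by
  simp only [hasQ, List.contains_cons]
  congr 1
  simp [eq_comm]

-- digit lists on segment lists, mirroring B's fold states
def nfDC (p c : Bool) : List (List Char) → List String
  | [] => []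
  | [_] => [lastD p]
  | s :: rest => midD p (c || hasQ s) :: nfDC (c || hasQ s) false rest

def fDC (c : Bool) : List (List Char) → List String
  | [] => []
  | [s] => [fdD (c || hasQ s)]
  | s :: rest => fdD (c || hasQ s) :: nfDC (c || hasQ s) false rest

-- flag-only versions (A's side)
def nfD (p : Bool) : List Bool → List String
  | [] => []
  | [_] => [lastD p]
  | f :: rest => midD p f :: nfD f rest

def fD : List Bool → List String
  | [] => []
  | [f] => [fdD f]
  | f :: rest => fdD f :: nfD f rest

lemma nfDC_cons_char (p c : Bool) (x : Char) (s : List Char) (ss : List (List Char)) :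
    nfDC p c ((x :: s) :: ss) = nfDC p (c || (x == '?')) (s :: ss) := by
  cases ss with
  | nil => simp [nfDC]
  | cons t ts =>
    simp only [nfDC, hasQ_cons]
    congr 2 <;> cases c <;> cases (x == '?') <;> cases hasQ s <;> rfl

lemma fDC_cons_char (c : Bool) (x : Char) (s : List Char) (ss : List (List Char)) :
    fDC c ((x :: s) :: ss) = fDC (c || (x == '?')) (s :: ss) := by
  cases ss with
  | nil =>
    simp only [fDC, hasQ_cons]
    congr 2; cases c <;> cases (x == '?') <;> cases hasQ s <;> rfl
  | cons t ts =>
    simp only [fDC, hasQ_cons]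
    congr 2 <;> cases c <;> cases (x == '?') <;> cases hasQ s <;> rfl

-- B's fold in non-first mode computes nfDC over the remaining segments
lemma foldB_nf (l : List Char) :
    ∀ (ds : List String) (p c : Bool),
      finishQA (l.foldl stepQA (ds, false, p, c)) = ds ++ nfDC p c (splitH l) := by
  induction l with
  | nil => intro ds p c; simp [finishQA, splitH, nfDC, lastD]
  | cons x rest ih =>
    intro ds p c
    by_cases hx : x = '#'
    · subst hx
      simp only [List.foldl_cons, stepQA, reduceIte]
      rw [ih]
      have := splitH_ne_nil rest
      cases hs : splitH rest with
      | nil => exact absurd hs this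
      | cons s ss =>
        simp [splitH, hs, nfDC, midD, hasQ, List.append_assoc]
    · by_cases hq : x = '?'
      · subst hq
        simp only [List.foldl_cons, stepQA, reduceIte]
        rw [if_neg hx]
        rw [ih, show splitH ('?' :: rest) = ('?' :: (splitH rest).head!) :: (splitH rest).tail by
          have := splitH_ne_nil rest
          cases hs : splitH rest with
          | nil => exact absurd hs this
          | cons s ss => simp [splitH, hs]]
        rw [nfDC_cons_char]
        have := splitH_ne_nil rest
        cases hs : splitH rest with
        | nil => exact absurd hs this
        | cons s ss => simp
      · simp only [List.foldl_cons, stepQA]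
        rw [if_neg hx, if_neg hq]
        rw [ih, show splitH (x :: rest) = (x :: (splitH rest).head!) :: (splitH rest).tail by
          have := splitH_ne_nil rest
          cases hs : splitH rest with
          | nil => exact absurd hs this
          | cons s ss => simp [splitH, hx, hs]]
        rw [nfDC_cons_char]
        have hxq : (x == '?') = false := by simp [hq]
        rw [hxq]
        have := splitH_ne_nil rest
        cases hs : splitH rest with
        | nil => exact absurd hs this
        | cons s ss => simp

-- B's fold from the initial (first) state computes fDC over the segments
lemma foldB_f (l : List Char) :
    ∀ (c : Bool), finishQA (l.foldl stepQA ([], true, false, c)) = fDC c (splitH l) := by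
  induction l with
  | nil => intro c; simp [finishQA, splitH, fDC, fdD, hasQ]
  | cons x rest ih =>
    intro c
    by_cases hx : x = '#'
    · subst hx
      simp only [List.foldl_cons, stepQA, reduceIte]
      rw [foldB_nf]
      have := splitH_ne_nil rest
      cases hs : splitH rest with
      | nil => exact absurd hs this
      | cons s ss =>
        simp [splitH, hs, fDC, fdD, hasQ]
    · by_cases hq : x = '?'
      · subst hq
        simp only [List.foldl_cons, stepQA, reduceIte]
        rw [if_neg hx]
        rw [ih, show splitH ('?' :: rest) = ('?' :: (splitH rest).head!) :: (splitH rest).tail by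
          have := splitH_ne_nil rest
          cases hs : splitH rest with
          | nil => exact absurd hs this
          | cons s ss => simp [splitH, hs]]
        rw [fDC_cons_char]
        have := splitH_ne_nil rest
        cases hs : splitH rest with
        | nil => exact absurd hs this
        | cons s ss => simp
      · simp only [List.foldl_cons, stepQA]
        rw [if_neg hx, if_neg hq]
        rw [ih, show splitH (x :: rest) = (x :: (splitH rest).head!) :: (splitH rest).tail by
          have := splitH_ne_nil rest
          cases hs : splitH rest with
          | nil => exact absurd hs this
          | cons s ss => simp [splitH, hx, hs]]
        rw [fDC_cons_char]
        have hxq : (x == '?') = false := by simp [hq]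
        rw [hxq]
        have := splitH_ne_nil rest
        cases hs : splitH rest with
        | nil => exact absurd hs this
        | cons s ss => simp

-- fDC at cur = false is the flag-only fD
lemma nfDC_false_eq (p : Bool) (segs : List (List Char)) :
    nfDC p false segs = nfD p (segs.map hasQ) := by
  induction segs generalizing p with
  | nil => rfl
  | cons s ss ih =>
    cases ss with
    | nil => rfl
    | cons t ts => simp only [nfDC, nfD, List.map_cons, Bool.false_or]; rw [ih]; rfl

lemma fDC_false_eq (segs : List (List Char)) :
    fDC false segs = fD (segs.map hasQ) := by
  cases segs with
  | nil => rfl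
  | cons s ss =>
    cases ss with
    | nil => rfl
    | cons t ts =>
      simp only [fDC, fD, List.map_cons, Bool.false_or]
      rw [nfDC_false_eq]; rfl

-- A's per-index digit in flag form (Nat index)
def aDig (q : List Bool) (i : Nat) : String :=
  if i = 0 then fdD (q.getD 0 false)
  else if i = q.length - 1 then lastD (q.getD (i - 1) false)
  else midD (q.getD (i - 1) false) (q.getD i false)

-- A's non-first indexed digits collapse to nfD (index-shift induction)
lemma range_map_tail (qs : List Bool) :
    ∀ (p : Bool),
      (List.range qs.length).map (fun j =>
        if j = qs.length - 1 then lastD ((p :: qs).getD j false)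
        else midD ((p :: qs).getD j false) (qs.getD j false)) = nfD p qs := by
  induction qs with
  | nil => intro p; rfl
  | cons f qs' ih =>
    intro p
    rw [show List.range (f :: qs').length = 0 :: (List.range qs'.length).map Nat.succ from
      List.range_succ_eq_map, List.map_cons, List.map_map]
    cases qs' with
    | nil => simp [nfD]
    | cons g qs'' =>
      have hne : (g :: qs'').length ≠ 0 := by simp
      have h0 : ¬ (0 = (f :: g :: qs'').length - 1) := by
        simp only [List.length_cons]; omega
      rw [if_neg h0]
      have htail :
          (List.range (g :: qs'').length).map
            ((fun j =>
              if j = (f :: g :: qs'').length - 1 then lastD ((p :: f :: g :: qs'').getD j false)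
              else midD ((p :: f :: g :: qs'').getD j false) ((f :: g :: qs'').getD j false))
              ∘ Nat.succ)
          = nfD f (g :: qs'') := by
        rw [← ih f]
        apply List.map_congr_left
        intro j hj
        simp only [Function.comp_apply]
        have hcond : (Nat.succ j = (f :: g :: qs'').length - 1) ↔ (j = (g :: qs'').length - 1) := by
          simp only [List.length_cons]; omega
        by_cases hl : j = (g :: qs'').length - 1
        · rw [if_pos (hcond.mpr hl), if_pos hl]
          rfl
        · rw [if_neg (fun h => hl (hcond.mp h)), if_neg hl]
          rfl
      rw [htail]
      simp [nfD]

lemma range_map_aDig (q : List Bool) : (List.range q.length).map (aDig q) = fD q := by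
  cases q with
  | nil => rfl
  | cons f qs =>
    rw [show List.range (f :: qs).length = 0 :: (List.range qs.length).map Nat.succ from
      List.range_succ_eq_map, List.map_cons, List.map_map]
    have h0 : aDig (f :: qs) 0 = fdD f := by simp [aDig]
    rw [h0]
    cases qs with
    | nil => rfl
    | cons g qs' =>
      have htail :
          (List.range (g :: qs').length).map (aDig (f :: g :: qs') ∘ Nat.succ)
            = nfD f (g :: qs') := by
        rw [← range_map_tail (g :: qs') f]
        apply List.map_congr_left
        intro j hj
        simp only [Function.comp_apply, aDig]
        have hs0 : ¬ (Nat.succ j = 0) := by omega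
        rw [if_neg hs0]
        have hcond : (Nat.succ j = (f :: g :: qs').length - 1) ↔ (j = (g :: qs').length - 1) := by
          simp only [List.length_cons]; omega
        by_cases hl : j = (g :: qs').length - 1
        · rw [if_pos (hcond.mpr hl), if_pos hl]
          rfl
        · rw [if_neg (fun h => hl (hcond.mp h)), if_neg hl]
          rfl
      rw [htail]
      rfl

-- A's Int-branch digit at index i < turns.length equals aDig of the flag list
lemma digitA_eq (turns : List String) (i : Nat) (hi : i < turns.length) :
    (if (i : Int) = 0 then
        (if PySem.Str.isIn "?" (PySem.List.pyGetD turns (i : Int) "") then "1" else "3")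
      else if (i : Int) = (turns.length : Int) - 1 then
        (if PySem.Str.isIn "?" (PySem.List.pyGetD turns ((i : Int) - 1) "") then "0" else "3")
      else
        if PySem.Str.isIn "?" (PySem.List.pyGetD turns ((i : Int) - 1) "") = true ∧
           ¬ PySem.Str.isIn "?" (PySem.List.pyGetD turns (i : Int) "") = true then "0"
        else if ¬ PySem.Str.isIn "?" (PySem.List.pyGetD turns ((i : Int) - 1) "") = true ∧
           PySem.Str.isIn "?" (PySem.List.pyGetD turns (i : Int) "") = true then "1"
        else if PySem.Str.isIn "?" (PySem.List.pyGetD turns ((i : Int) - 1) "") = true ∧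
           PySem.Str.isIn "?" (PySem.List.pyGetD turns (i : Int) "") = true then "2"
        else "3")
    = aDig (turns.map (fun t => PySem.Str.isIn "?" t)) i := by
  set q := turns.map (fun t => PySem.Str.isIn "?" t) with hqdef
  have hlen : q.length = turns.length := by simp [hqdef]
  have hq : ∀ j : Nat, j < turns.length →
      q.getD j false = PySem.Str.isIn "?" (turns.getD j "") := by
    intro j hj
    rw [List.getD_eq_getElem _ _ (by simpa [hqdef] using hj), List.getD_eq_getElem _ _ hj]
    simp [hqdef]
  rcases Nat.eq_zero_or_pos i with h0 | h0
  · subst h0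
    rw [if_pos (show ((0 : Nat) : Int) = 0 by norm_num)]
    unfold aDig
    rw [if_pos rfl, PySem.List.pyGetD_natCast, hq 0 hi]
    cases hb : PySem.Str.isIn "?" (turns.getD 0 "") <;> simp [fdD]
  · have hne : ((i : Int)) ≠ 0 := by omega
    have hc1 : ((i : Int) - 1) = ((i - 1 : Nat) : Int) := by omega
    rw [if_neg hne, hc1, PySem.List.pyGetD_natCast, PySem.List.pyGetD_natCast]
    unfold aDig
    rw [if_neg (show ¬ i = 0 by omega), hlen, hq (i - 1) (by omega), hq i hi]
    by_cases hlast : i = turns.length - 1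
    · rw [if_pos (show (i : Int) = (turns.length : Int) - 1 by omega), if_pos hlast]
      cases hb : PySem.Str.isIn "?" (turns.getD (i - 1) "") <;> simp [lastD]
    · rw [if_neg (show ¬(i : Int) = (turns.length : Int) - 1 by omega), if_neg hlast]
      cases hb : PySem.Str.isIn "?" (turns.getD (i - 1) "") <;>
        cases hc : PySem.Str.isIn "?" (turns.getD i "") <;>
          simp [midD]

-- turns of A = segments of splitH, and the flag bridge
lemma turns_eq (dial : String) :
    (PySem.Str.split? dial "#").getD [] = (splitH dial.toList).map String.ofList := by
  simp only [PySem.Str.split?, PySem.Chars.split?]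
  rw [if_neg (by decide)]
  simp [splitOn_eq_splitH]

lemma isIn_ofList_eq_hasQ (s : List Char) :
    PySem.Str.isIn "?" (String.ofList s) = hasQ s := by
  show PySem.Chars.isIn "?".toList (String.ofList s).toList = hasQ s
  simp only [String.toList_ofList]
  rw [show "?".toList = ['?'] by decide]
  by_cases h : '?' ∈ s
  · rw [(PySem.Chars.isIn_iff_infix ['?'] s).mpr ((List.singleton_infix_iff '?' s).mpr h)]
    simp [hasQ, h]
  · rw [(PySem.Chars.isIn_eq_false_iff ['?'] s).mpr (fun hi => h ((List.singleton_infix_iff '?' s).mp hi))]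
    simp [hasQ, h]

-- per-dialogue equality
lemma dial_eq (dial : String) :
    PySem.Str.join "" ((PySem.List.enumerate ((PySem.Str.split? dial "#").getD [])).foldl
      (fun qa_turn p =>
        let i := p.1
        let turn := p.2
        qa_turn ++
          [ if i = 0 then
              (if PySem.Str.isIn "?" turn then "1" else "3")
            else if i = (((PySem.Str.split? dial "#").getD []).length : Int) - 1 then
              (if PySem.Str.isIn "?"
                  (PySem.List.pyGetD ((PySem.Str.split? dial "#").getD []) (i - 1) "") then "0" else "3")
            else
              if PySem.Str.isIn "?"
                  (PySem.List.pyGetD ((PySem.Str.split? dial "#").getD []) (i - 1) "") = true ∧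
                 ¬ PySem.Str.isIn "?" turn = true then "0"
              else if ¬ PySem.Str.isIn "?"
                  (PySem.List.pyGetD ((PySem.Str.split? dial "#").getD []) (i - 1) "") = true ∧
                 PySem.Str.isIn "?" turn = true then "1"
              else if PySem.Str.isIn "?"
                  (PySem.List.pyGetD ((PySem.Str.split? dial "#").getD []) (i - 1) "") = true ∧
                 PySem.Str.isIn "?" turn = true then "2"
              else "3" ]) [])
    = PySem.Str.join "" (finishQA (dial.toList.foldl stepQA ([], true, false, false))) := by
  rw [foldB_f, fDC_false_eq]
  set turns := (PySem.Str.split? dial "#").getD [] with hturns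
  rw [PySem.List.foldl_append_singleton_eq_map]
  simp only [List.nil_append]
  congr 1
  rw [PySem.List.enumerate_eq_map_pyRange _ "", PySem.List.len_eq,
      PySem.List.pyRange_zero_nat, List.map_map, List.map_map]
  have hmap : (splitH dial.toList).map hasQ
      = turns.map (fun t => PySem.Str.isIn "?" t) := by
    rw [hturns, turns_eq, List.map_map]
    apply List.map_congr_left
    intro s _
    exact (isIn_ofList_eq_hasQ s).symm
  rw [hmap, ← range_map_aDig]
  have hlen : (turns.map (fun t => PySem.Str.isIn "?" t)).length = turns.length := by simp
  rw [hlen]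
  apply List.map_congr_left
  intro i hi
  simp only [Function.comp_apply]
  exact digitA_eq turns i (List.mem_range.mp hi)

-- ===== VERDICT (by name: the statement is the Claim_ definition above) =====
theorem add_qa_turn_spec : Claim_equal_add_qa_turn := by
  intro dialogues _
  unfold Spec_add_qa_turn
  simp only [add_qa_turn, add_qa_turn_alt]
  rw [PySem.List.foldl_append_singleton_eq_map, PySem.List.foldl_append_singleton_eq_map]
  simp only [List.nil_append]
  congr 1
  apply List.map_congr_left
  intro dial _
  exact dial_eq dial
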